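-- pv_equiv track=rewrite | github.com/ToglivvilgoT/Advent-of-Code-2024 | day23.py | solve
-- ===== SOURCE A (Python) =====
-- from itertools import product
--
-- def solve(network):
--     triples = set()
--     for computer in network:
--         if computer[0] != 't':
--             continue
--         for comp1, comp2 in product(network[computer], repeat=2):
--             if comp1 in network[comp2]:
--                 triples.add(frozenset((computer, comp1, comp2)))
--     return len(triples)
-- ===== SOURCE B (Python) =====
-- def solve(network):
--     # Edge-centric scan: for every directed edge comp2 -> comp1, find the
--     # t-named computers adjacent to both endpoints.
--     t_computers = [c for c in network if c[0] == 't']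
--     triples = set()
--     for comp2, neighbours in network.items():
--         for comp1 in neighbours:
--             for computer in t_computers:
--                 if comp1 in network[computer] and comp2 in network[computer]:
--                     triples.add(frozenset((computer, comp1, comp2)))
--     return len(triples)
-- ===== Notes on version B (the rewrite author's own statement) =====
-- stated objective: alternative
-- what changed: A scans each 't'-named vertex and the cartesian square of its neighbour list; B scans each directed edge (comp2 -> comp1) once and, for each, the precomputed list of 't'-named vertices adjacent to both endpoints - an edge-centric instead of vertex-centric traversal building the same set of frozensets.
import Mathlib
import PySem

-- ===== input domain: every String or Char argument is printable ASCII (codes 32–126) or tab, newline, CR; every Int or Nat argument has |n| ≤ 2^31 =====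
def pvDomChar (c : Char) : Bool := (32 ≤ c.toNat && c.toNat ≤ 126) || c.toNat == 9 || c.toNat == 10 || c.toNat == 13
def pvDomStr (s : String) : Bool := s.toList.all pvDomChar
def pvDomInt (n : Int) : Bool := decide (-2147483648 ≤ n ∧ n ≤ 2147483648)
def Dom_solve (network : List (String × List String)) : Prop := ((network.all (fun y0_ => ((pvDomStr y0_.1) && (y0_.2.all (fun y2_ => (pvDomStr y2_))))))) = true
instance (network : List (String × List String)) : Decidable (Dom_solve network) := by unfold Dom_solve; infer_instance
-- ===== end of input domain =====

-- B replaces A's vertex-centric scan (each 't'-vertex × the cartesian square of its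
-- neighbour list) by an edge-centric scan (each directed edge × the 't'-vertices
-- adjacent to both endpoints); same result, a genuinely different traversal.

-- Python's frozenset of three strings, represented canonically as the sorted list
-- of its distinct elements (exact for frozenset equality, hence for the set's size).
def pyFrozen3 (a b c : String) : List String :=
  PySem.List.sorted (PySem.Set.ofList [a, b, c]) (fun x => x) false

-- ===== PORT A =====
-- the set `triples` A has built when its outer loop finishes
def triplesA (network : List (String × List String)) : PySem.Set (List String) :=
  let d := PySem.Dict.mk network
  network.foldl (fun tr p =>
    if PySem.Str.pyGet? p.1 0 ≠ some 't' then tr   -- `if computer[0] != 't': continue`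
    else
      -- `for comp1, comp2 in product(network[computer], repeat=2)`
      (d.getD p.1 []).foldl (fun tr comp1 =>
        (d.getD p.1 []).foldl (fun tr comp2 =>
          -- `network[comp2]` raises KeyError when comp2 is not a key — excluded by Pre_solve
          if comp1 ∈ d.getD comp2 [] then PySem.Set.add tr (pyFrozen3 p.1 comp1 comp2)
          else tr) tr) tr) PySem.Set.empty

def solve (network : List (String × List String)) : Int :=
  PySem.Set.len (triplesA network)

-- ===== PORT B =====
-- the set `triples` B has built when its loops finish
def triplesB (network : List (String × List String)) : PySem.Set (List String) :=
  let d := PySem.Dict.mk network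
  let tComputers := (network.map (·.1)).filter (fun c => PySem.Str.pyGet? c 0 == some 't')
  network.foldl (fun tr p =>
    p.2.foldl (fun tr comp1 =>
      tComputers.foldl (fun tr c =>
        if comp1 ∈ d.getD c [] ∧ p.1 ∈ d.getD c [] then
          PySem.Set.add tr (pyFrozen3 c comp1 p.1)
        else tr) tr) tr) PySem.Set.empty

def solve_alt (network : List (String × List String)) : Int :=
  PySem.Set.len (triplesB network)

-- ===== PRECONDITION & SPEC =====
-- Pre_ excludes exactly the inputs where Python A raises — IndexError on an
-- empty-string key, KeyError when a neighbour of a 't…'-key is not a key — and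
-- association lists with duplicate keys, which cannot arise from a Python dict.
def Pre_solve (network : List (String × List String)) : Prop :=
  (network.map (·.1)).Nodup ∧
  ∀ p ∈ network, p.1 ≠ "" ∧
    (PySem.Str.pyGet? p.1 0 = some 't' → ∀ v ∈ p.2, v ∈ network.map (·.1))
instance (network : List (String × List String)) : Decidable (Pre_solve network) := by
  unfold Pre_solve; infer_instance

def pvWitness_solve : (List (String × List String)) :=
  [("ta", ["b", "c"]), ("b", ["c", "ta"]), ("c", ["ta", "b"])]

def Spec_solve (network : List (String × List String)) (out : Int) : Prop := out = solve_alt network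
instance (network : List (String × List String)) (out : Int) : Decidable (Spec_solve network out) := by unfold Spec_solve; infer_instance

-- ===== CLAIM (what is proved, stated in full; the proofs are below) =====
def Claim_equal_solve : Prop := ∀ (network : List (String × List String)), Dom_solve network → Pre_solve network → Spec_solve network (solve network)

-- ===== LEMMAS AND PROOFS =====

-- membership through a foldl whose step adds elements described by Q
lemma mem_foldl_step {α β : Type} [BEq α] (l : List β)
    (g : PySem.Set α → β → PySem.Set α) (Q : β → α → Prop)
    (h : ∀ (s : PySem.Set α) (b : β), b ∈ l → ∀ x, x ∈ g s b ↔ x ∈ s ∨ Q b x) :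
    ∀ (s : PySem.Set α) (x : α), x ∈ l.foldl g s ↔ x ∈ s ∨ ∃ b ∈ l, Q b x := by
  induction l with
  | nil => simp
  | cons b l ih =>
    intro s x
    simp only [List.foldl_cons]
    rw [ih (fun s b hb => h s b (List.mem_cons_of_mem _ hb)),
        h s b (List.mem_cons_self) x]
    simp only [List.mem_cons]
    constructor
    · rintro (((hs | hq) | ⟨b', hb', hq⟩))
      · exact Or.inl hs
      · exact Or.inr ⟨b, Or.inl rfl, hq⟩
      · exact Or.inr ⟨b', Or.inr hb', hq⟩
    · rintro (hs | ⟨b', (rfl | hb'), hq⟩)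
      · exact Or.inl (Or.inl hs)
      · exact Or.inl (Or.inr hq)
      · exact Or.inr ⟨b', hb', hq⟩

-- a foldl whose step preserves Nodup keeps the set Nodup
lemma nodup_foldl_step {α β : Type} [BEq α] (l : List β)
    (g : PySem.Set α → β → PySem.Set α)
    (h : ∀ (s : PySem.Set α) (b : β), s.Nodup → (g s b).Nodup) :
    ∀ (s : PySem.Set α), s.Nodup → (l.foldl g s).Nodup := by
  induction l with
  | nil => intro s hs; simpa using hs
  | cons b l ih => intro s hs; exact ih _ (h s b hs)

-- the innermost loop shape: conditionally add one described element
lemma mem_foldl_if_add {α β : Type} [BEq α] [LawfulBEq α] (l : List β)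
    (P : β → Prop) [DecidablePred P] (e : β → α) (s : PySem.Set α) (x : α) :
    x ∈ l.foldl (fun s b => if P b then PySem.Set.add s (e b) else s) s ↔
      x ∈ s ∨ ∃ b ∈ l, P b ∧ x = e b := by
  refine mem_foldl_step l _ (fun b x => P b ∧ x = e b) ?_ s x
  intro s b _ x
  split_ifs with hp
  · rw [PySem.Set.mem_add]; tauto
  · tauto

-- neighbour-list lookup in the two ports
def adjOf (network : List (String × List String)) (k : String) : List String :=
  (PySem.Dict.mk network).getD k []

lemma adjOf_eq_of_mem (network : List (String × List String))
    (hnd : (network.map (·.1)).Nodup) {p : String × List String} (hp : p ∈ network) :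
    adjOf network p.1 = p.2 := by
  have : ((PySem.Dict.mk network).keys).Nodup := by
    rw [PySem.Dict.keys_mk]; exact hnd
  exact PySem.Dict.getD_of_mem_items (PySem.Dict.mk network) hp this []

lemma mem_triplesA (network : List (String × List String)) (x : List String) :
    x ∈ triplesA network ↔
      ∃ p ∈ network, PySem.Str.pyGet? p.1 0 = some 't' ∧
        ∃ a ∈ adjOf network p.1, ∃ b ∈ adjOf network p.1,
          a ∈ adjOf network b ∧ x = pyFrozen3 p.1 a b := by
  unfold triplesA
  rw [mem_foldl_step network _
    (fun p x => PySem.Str.pyGet? p.1 0 = some 't' ∧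
        ∃ a ∈ adjOf network p.1, ∃ b ∈ adjOf network p.1,
          a ∈ adjOf network b ∧ x = pyFrozen3 p.1 a b) ?_ PySem.Set.empty x]
  · simp [PySem.Set.empty]
  · intro s p _ x
    split_ifs with ht
    · constructor
      · exact Or.inl
      · rintro (hs | ⟨ht', _⟩)
        · exact hs
        · exact absurd ht' ht
    · replace ht := not_ne_iff.mp ht
      rw [mem_foldl_step _ _
        (fun a x => ∃ b ∈ adjOf network p.1, a ∈ adjOf network b ∧ x = pyFrozen3 p.1 a b) ?_ s x]
      · constructor
        · rintro (hs | ⟨a, ha, hq⟩)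
          · exact Or.inl hs
          · exact Or.inr ⟨ht, a, ha, hq⟩
        · rintro (hs | ⟨_, a, ha, hq⟩)
          · exact Or.inl hs
          · exact Or.inr ⟨a, ha, hq⟩
      · intro s a _ x
        exact mem_foldl_if_add (adjOf network p.1)
          (fun b => a ∈ adjOf network b) (fun b => pyFrozen3 p.1 a b) s x

lemma mem_triplesB (network : List (String × List String)) (x : List String) :
    x ∈ triplesB network ↔
      ∃ p ∈ network, ∃ a ∈ p.2,
        ∃ c ∈ (network.map (·.1)).filter (fun c => PySem.Str.pyGet? c 0 == some 't'),
          (a ∈ adjOf network c ∧ p.1 ∈ adjOf network c) ∧ x = pyFrozen3 c a p.1 := by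
  unfold triplesB
  rw [mem_foldl_step network _
    (fun p x => ∃ a ∈ p.2,
        ∃ c ∈ (network.map (·.1)).filter (fun c => PySem.Str.pyGet? c 0 == some 't'),
          (a ∈ adjOf network c ∧ p.1 ∈ adjOf network c) ∧ x = pyFrozen3 c a p.1) ?_ PySem.Set.empty x]
  · simp [PySem.Set.empty]
  · intro s p _ x
    rw [mem_foldl_step _ _
      (fun a x => ∃ c ∈ (network.map (·.1)).filter (fun c => PySem.Str.pyGet? c 0 == some 't'),
          (a ∈ adjOf network c ∧ p.1 ∈ adjOf network c) ∧ x = pyFrozen3 c a p.1) ?_ s x]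
    intro s a _ x
    exact mem_foldl_if_add _
      (fun c => a ∈ adjOf network c ∧ p.1 ∈ adjOf network c) (fun c => pyFrozen3 c a p.1) s x

lemma nodup_triplesA (network : List (String × List String)) : (triplesA network).Nodup := by
  unfold triplesA
  refine nodup_foldl_step _ _ ?_ _ (by simp [PySem.Set.empty])
  intro s p hs
  split_ifs
  · exact hs
  · refine nodup_foldl_step _ _ ?_ _ hs
    intro s a hs
    refine nodup_foldl_step _ _ ?_ _ hs
    intro s b hs
    split_ifs
    · exact PySem.Set.nodup_add _ _ hs
    · exact hs

lemma nodup_triplesB (network : List (String × List String)) : (triplesB network).Nodup := by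
  unfold triplesB
  refine nodup_foldl_step _ _ ?_ _ (by simp [PySem.Set.empty])
  intro s p hs
  refine nodup_foldl_step _ _ ?_ _ hs
  intro s a hs
  refine nodup_foldl_step _ _ ?_ _ hs
  intro s c hs
  split_ifs
  · exact PySem.Set.nodup_add _ _ hs
  · exact hs

lemma triples_perm (network : List (String × List String)) (hpre : Pre_solve network) :
    (triplesA network).Perm (triplesB network) := by
  obtain ⟨hnd, hkeys⟩ := hpre
  rw [List.perm_ext_iff_of_nodup (nodup_triplesA network) (nodup_triplesB network)]
  intro x
  rw [mem_triplesA, mem_triplesB]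
  constructor
  · rintro ⟨p, hp, ht, a, ha, b, hb, hab, hx⟩
    have hadj : adjOf network p.1 = p.2 := adjOf_eq_of_mem network hnd hp
    have hbkey : b ∈ network.map (·.1) := (hkeys p hp).2 ht b (hadj ▸ hb)
    obtain ⟨q, hq, hq1⟩ := List.mem_map.mp hbkey
    have hc : p.1 ∈ (network.map (·.1)).filter (fun c => PySem.Str.pyGet? c 0 == some 't') :=
      List.mem_filter.mpr ⟨List.mem_map.mpr ⟨p, hp, rfl⟩, by simpa using ht⟩
    refine ⟨q, hq, a, ?_, p.1, hc, ⟨ha, hq1 ▸ hb⟩, ?_⟩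
    · have h2 : adjOf network q.1 = q.2 := adjOf_eq_of_mem network hnd hq
      rw [← h2, hq1]; exact hab
    · rw [hx, hq1]
  · rintro ⟨q, hq, a, ha, c, hc, ⟨h1, h2⟩, hx⟩
    rcases List.mem_filter.mp hc with ⟨hck, hct⟩
    replace hct : PySem.Str.pyGet? c 0 = some 't' := by simpa using hct
    obtain ⟨p, hp, hp1⟩ := List.mem_map.mp hck
    refine ⟨p, hp, hp1 ▸ hct, a, hp1 ▸ h1, q.1, hp1 ▸ h2, ?_, by rw [hx, hp1]⟩
    rw [adjOf_eq_of_mem network hnd hq]; exact ha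

-- ===== VERDICT (by name: the statement is the Claim_ definition above) =====
theorem solve_spec : Claim_equal_solve := by
  intro network _ hpre
  unfold Spec_solve solve solve_alt PySem.Set.len
  exact congrArg Int.ofNat (triples_perm network hpre).length_eq
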